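-- pv_equiv track=rewrite | github.com/pySRURGS/pyGOURGS | pyGOURGS.py | deinterleave
-- ===== SOURCE A (Python) =====
-- def deinterleave(num, m):
--     """
--     Given a number `num`, returns the number, deinterleaved, into m folds
--     Eg: if `m` were 2, we would be returning the odd and even bits of the number
--
--     Parameters
--     ----------
--     num : list of ints
--         The number being deinterleaved
--
--     m : int
--         An integer denoting the number of folds into which we deinterleave `num`
--
--     Returns
--     -------
--     m_elements : list of integers
--
--     """
--     m_elements = []
--     for i in range(0,m):
--         m_elements.append([])
--     while len(num) % m != 0:
--         num.insert(0,0)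
--     for i in range(0, len(num), m):
--         for j in range(0, m):
--             m_elements[j].append(num[i+j])
--     for j in range(0, m):
--         m_elements[j] = int("".join(map(str, m_elements[j])))
--     return m_elements
-- ===== SOURCE B (Python) =====
-- def deinterleave(num, m):
--     # Pad in place to a multiple of m (same mutation as the original for m > 0),
--     # then read each fold directly as a strided column slice.
--     num[:0] = [0] * (-len(num) % m)
--     return [int("".join(map(str, num[j::m]))) for j in range(m)]
-- ===== Notes on version B (the rewrite author's own statement) =====
-- stated objective: idiomatic
-- what changed: Replaces the one-zero-at-a-time padding loop and the nested block/inner-index transpose loops (appending element i+j to fold j) with an arithmetically computed pad count prepended in one splice and m independent strided column slices num[j::m], each joined and converted directly.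
import Mathlib
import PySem

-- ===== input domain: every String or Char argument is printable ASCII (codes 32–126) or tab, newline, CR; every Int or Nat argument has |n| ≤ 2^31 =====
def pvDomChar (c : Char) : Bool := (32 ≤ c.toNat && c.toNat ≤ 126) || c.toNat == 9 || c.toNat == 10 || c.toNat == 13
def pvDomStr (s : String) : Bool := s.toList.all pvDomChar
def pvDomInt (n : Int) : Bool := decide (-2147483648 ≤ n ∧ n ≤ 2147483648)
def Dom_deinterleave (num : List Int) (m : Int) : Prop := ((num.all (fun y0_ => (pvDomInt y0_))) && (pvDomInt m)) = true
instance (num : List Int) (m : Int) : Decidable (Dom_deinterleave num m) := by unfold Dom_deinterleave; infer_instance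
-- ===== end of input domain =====

-- B replaces A's block/index transpose loops and one-zero-at-a-time padding with arithmetic
-- padding plus m strided column slices num[j::m] (idiomatic/simpler; return value proved equal;
-- both mutate `num` in place — identically for m > 0, while for m < 0 only A pads `num`).

-- ===== PORT A =====
-- while len(num) % m != 0: num.insert(0, 0)
-- fuel m.natAbs bounds the at most |m|-1 iterations; for m = 0 (Python ZeroDivisionError,
-- outside Pre_) the fuel is 0 and the loop body never runs.
def padWhile (m : Int) : Nat → List Int → List Int
  | 0, xs => xs
  | fuel+1, xs =>
      if PySem.Int.mod (xs.length : Int) m ≠ 0 then padWhile m fuel (0 :: xs) else xs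

-- for j in range(0, m): m_elements[j].append(num[i+j])
def innerLoop (padded : List Int) (m : Int) (fs : List (List Int)) (i : Int) : List (List Int) :=
  (PySem.List.pyRange 0 m 1).foldl
    (fun fs' j => fs'.set j.toNat ((fs'.getD j.toNat []) ++ [PySem.List.pyGetD padded (i + j) 0])) fs

def deinterleave (num : List Int) (m : Int) : List Int :=
  -- m_elements = []; for i in range(0, m): m_elements.append([])
  let init : List (List Int) := (PySem.List.pyRange 0 m 1).foldl (fun acc _ => acc ++ [[]]) []
  let padded : List Int := padWhile m m.natAbs num
  -- for i in range(0, len(num), m): for j in range(0, m): m_elements[j].append(num[i+j])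
  let folds : List (List Int) :=
    (PySem.List.pyRange 0 (padded.length : Int) m).foldl (innerLoop padded m) init
  -- for j in range(0, m): m_elements[j] = int("".join(map(str, m_elements[j])))
  -- int(s) is ofChars?; none (ValueError, e.g. empty num or a '-' inside the joined string) is outside Pre_
  (PySem.List.pyRange 0 m 1).map (fun j =>
    (PySem.Int.ofChars? (PySem.Chars.join [] ((folds.getD j.toNat []).map PySem.Int.toChars))).getD 0)

-- ===== PORT B =====
def deinterleave_alt (num : List Int) (m : Int) : List Int :=
  -- num[:0] = [0] * (-len(num) % m)
  let padded : List Int :=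
    List.replicate (PySem.Int.mod (-(num.length : Int)) m).toNat 0 ++ num
  -- [int("".join(map(str, num[j::m]))) for j in range(m)]
  (PySem.List.pyRange 0 m 1).map (fun j =>
    (PySem.Int.ofChars? (PySem.Chars.join []
      (((PySem.List.slice? padded (some j) none m).getD []).map PySem.Int.toChars))).getD 0)

-- ===== PRECONDITION & SPEC =====
-- Pre_ excludes exactly the inputs where A raises: m = 0 (ZeroDivisionError in len(num) % m),
-- m > 0 with empty num (int("") → ValueError), and m > 0 with a negative element that does not
-- land at the head of its fold after padding (the joined digit string then has an interior '-',
-- int(...) → ValueError).  B raises on exactly the same inputs.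
def Pre_deinterleave (num : List Int) (m : Int) : Prop :=
  (0 < m ∧ num ≠ [] ∧
    ∀ i ∈ List.range num.length,
      num.getD i 0 < 0 → (i : Int) + (-(num.length : Int)) % m < m)
  ∨ m < 0
instance (num : List Int) (m : Int) : Decidable (Pre_deinterleave num m) := by
  unfold Pre_deinterleave; infer_instance
def pvWitness_deinterleave : List Int × Int := ([1, 2, 3], 2)

def Spec_deinterleave (num : List Int) (m : Int) (out : List Int) : Prop := out = deinterleave_alt num m
instance (num : List Int) (m : Int) (out : List Int) : Decidable (Spec_deinterleave num m out) := by unfold Spec_deinterleave; infer_instance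

-- ===== CLAIM (what is proved, stated in full; the proofs are below) =====
def Claim_equal_deinterleave : Prop := ∀ (num : List Int) (m : Int), Dom_deinterleave num m → Pre_deinterleave num m → Spec_deinterleave num m (deinterleave num m)

-- ===== LEMMAS AND PROOFS =====

-- lifting a fold of index-(j+1) updates off a cons cell
lemma foldl_set_shift (g : Nat → Int) (js : List Nat) :
    ∀ (h : List Int) (t : List (List Int)),
      js.foldl (fun fs' j => fs'.set (j+1) ((fs'.getD (j+1) []) ++ [g (j+1)])) (h :: t)
        = h :: js.foldl (fun fs' j => fs'.set j ((fs'.getD j []) ++ [g (j+1)])) t := by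
  induction js with
  | nil => intro h t; rfl
  | cons j js ih =>
      intro h t
      simp only [List.foldl_cons, List.getD_cons_succ, List.set_cons_succ]
      exact ih h _

-- the inner for-loop sets each index exactly once, appending g j to fold j
lemma foldl_set_snoc (g : Nat → Int) (fs : List (List Int)) :
    (List.range fs.length).foldl (fun fs' j => fs'.set j ((fs'.getD j []) ++ [g j])) fs
      = fs.mapIdx (fun j fj => fj ++ [g j]) := by
  induction fs generalizing g with
  | nil => rfl
  | cons f t ih =>
      rw [List.length_cons, List.range_succ_eq_map]
      simp only [List.foldl_cons, List.getD_cons_zero, List.set_cons_zero, List.foldl_map]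
      have hshift := foldl_set_shift g (List.range t.length) (f ++ [g 0]) t
      simp only [Nat.succ_eq_add_one] at *
      rw [hshift, List.mapIdx_cons, ih (fun j => g (j+1))]

lemma foldl_set_snoc_map (g : Nat → Int) (F : Nat → List Int) (mn : Nat) :
    (List.range mn).foldl (fun fs' j => fs'.set j ((fs'.getD j []) ++ [g j])) ((List.range mn).map F)
      = (List.range mn).map (fun j => F j ++ [g j]) := by
  have h := foldl_set_snoc g ((List.range mn).map F)
  rw [List.length_map, List.length_range] at h
  rw [h]
  apply List.ext_getElem
  · simp
  · intro i h1 h2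
    simp [List.getElem_mapIdx]

lemma innerLoop_eq (padded : List Int) (m : Int) (F : Nat → List Int) (i : Int) :
    innerLoop padded m ((List.range m.toNat).map F) i
      = (List.range m.toNat).map (fun j => F j ++ [PySem.List.pyGetD padded (i + j) 0]) := by
  unfold innerLoop
  rw [PySem.List.pyRange_one, List.foldl_map]
  simp only [zero_add, sub_zero, Int.toNat_natCast]
  exact foldl_set_snoc_map (fun j => PySem.List.pyGetD padded (i + (j:Int)) 0) F m.toNat

lemma folds_aux (padded : List Int) (m : Int) (hm : 0 < m) (K : Nat) :
    ∀ (t : Nat), t ≤ K →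
    (List.range t).foldl (fun fs (u : Nat) => innerLoop padded m fs (0 + m * (u:Int)))
        ((List.range m.toNat).map (fun _ => ([] : List Int)))
      = (List.range m.toNat).map
          (fun j => (List.range t).map (fun u => padded.getD (m.toNat * u + j) 0)) := by
  intro t
  induction t with
  | zero => intro _; simp
  | succ t ih =>
      intro ht
      rw [List.range_succ, List.foldl_append, List.foldl_cons, List.foldl_nil, ih (by omega)]
      rw [innerLoop_eq]
      apply List.map_congr_left
      intro j hj
      rw [List.mem_range] at hj
      have hidx : (0 + m * (t:Int) + (j:Int)) = ((m.toNat * t + j : Nat) : Int) := by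
        push_cast [Int.toNat_of_nonneg hm.le]; ring
      rw [hidx, PySem.List.pyGetD_natCast]
      simp [List.map_append]

lemma folds_eq (padded : List Int) (m : Int) (hm : 0 < m) (K : Nat)
    (hlen : padded.length = K * m.toNat) :
    (PySem.List.pyRange 0 (padded.length : Int) m).foldl (innerLoop padded m)
        ((List.range m.toNat).map (fun _ => ([] : List Int)))
      = (List.range m.toNat).map
          (fun j => (List.range K).map (fun u => padded.getD (m.toNat * u + j) 0)) := by
  rw [PySem.List.pyRange_of_pos 0 _ hm]
  have hcnt : (if (0:Int) < (padded.length : Int) then (((padded.length : Int) - 0 + m - 1) / m).toNat else 0) = K := by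
    rcases Nat.eq_zero_or_pos K with hK | hK
    · subst hK; simp at hlen; rw [if_neg (by simp [hlen])]
    · have hmn : 0 < m.toNat := by omega
      have hL : 0 < padded.length := by
        rw [hlen]; exact Nat.mul_pos hK hmn
      rw [if_pos (by exact_mod_cast hL)]
      obtain ⟨mn, hmt⟩ : ∃ mn : Nat, m = (mn : Int) := ⟨m.toNat, (Int.toNat_of_nonneg hm.le).symm⟩
      have hmn2 : m.toNat = mn := by omega
      rw [hmn2] at hlen
      have hmn3 : 0 < mn := by omega
      have : ((padded.length : Int) - 0 + m - 1) = ((K * mn + (mn - 1) : Nat) : Int) := by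
        rw [hlen, hmt]; push_cast [hmn3]; ring_nf
      rw [this, hmt, ← Int.natCast_div, Int.toNat_natCast]
      rw [Nat.mul_comm K mn, Nat.mul_add_div hmn3, Nat.div_eq_of_lt (by omega)]
      omega

  rw [hcnt, List.foldl_map]
  exact folds_aux padded m hm K K (le_refl K)
lemma slice_col (padded : List Int) (m : Int) (hm : 0 < m) (K : Nat)
    (hlen : padded.length = K * m.toNat) (j : Nat) (hj : j < m.toNat) :
    (PySem.List.slice? padded (some (j : Int)) none m).getD []
      = (List.range K).map (fun u => padded.getD (m.toNat * u + j) 0) := by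
  obtain ⟨mn, hmt⟩ : ∃ mn : Nat, m = (mn : Int) := ⟨m.toNat, (Int.toNat_of_nonneg hm.le).symm⟩
  have hmn2 : m.toNat = mn := by omega
  rw [hmn2] at hlen hj
  have hmn3 : 0 < mn := by omega
  rw [hmn2]
  unfold PySem.List.slice? PySem.List.sliceIndices
  rw [if_neg (by omega)]
  simp only [hmt]
  have hnotneg : ¬ ((mn : Int) < 0) := by omega
  rw [if_neg hnotneg, if_neg hnotneg, if_neg hnotneg]
  simp only [if_neg (show ¬ ((j:Int) < 0) by omega)]
  rcases Nat.eq_zero_or_pos K with hK | hK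
  · subst hK
    simp at hlen
    simp [hlen]
  · have hjL : (j : Int) < (padded.length : Int) := by
      have h2 : j < K * mn := by nlinarith
      rw [hlen]; exact_mod_cast h2
    have hmin : min (j : Int) (padded.length : Int) = (j : Int) := min_eq_left hjL.le
    rw [hmin]
    have hcnt : (if (j:Int) < (padded.length:Int) then (((padded.length:Int) - (j:Int) + (mn:Int) - 1) / (mn:Int)).toNat else 0) = K := by
      rw [if_pos hjL]
      have : ((padded.length : Int) - (j:Int) + (mn:Int) - 1) = ((K * mn + (mn - 1 - j) : Nat) : Int) := by
        rw [hlen]; push_cast [hmn3, hj]; omega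
      rw [this, ← Int.natCast_div, Int.toNat_natCast]
      rw [Nat.mul_comm K mn, Nat.mul_add_div hmn3, Nat.div_eq_of_lt (by omega)]
      omega
    rw [if_pos (by omega), hcnt]
    have hgoal : ∀ k ∈ List.range K, padded[((j:Int) + (mn:Int) * (k:Int)).toNat]? = some (padded.getD (mn * k + j) 0) := by
      intro k hk
      rw [List.mem_range] at hk
      have hidx : ((j:Int) + (mn:Int) * (k:Int)).toNat = mn * k + j := by omega
      have hlt : mn * k + j < padded.length := by rw [hlen]; nlinarith
      rw [hidx, List.getElem?_eq_getElem hlt, List.getD_eq_getElem _ _ hlt]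
    show Option.getD (some _) [] = _
    rw [Option.getD_some]
    rw [List.filterMap_congr hgoal]
    rw [show (fun k => some (padded.getD (mn * k + j) 0)) = some ∘ (fun k => padded.getD (mn * k + j) 0) from rfl]
    rw [List.filterMap_eq_map]
lemma padWhile_eq (m : Int) (hm : 0 < m) :
    ∀ (fuel : Nat) (xs : List Int),
      (PySem.Int.mod (-(xs.length : Int)) m).toNat ≤ fuel →
      padWhile m fuel xs
        = List.replicate (PySem.Int.mod (-(xs.length : Int)) m).toNat 0 ++ xs := by
  intro fuel
  induction fuel with
  | zero =>
      intro xs h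
      have h0 : (PySem.Int.mod (-(xs.length : Int)) m).toNat = 0 := Nat.le_zero.mp h
      rw [padWhile, h0]; rfl
  | succ f ih =>
      intro xs h
      simp only [PySem.Int.mod_eq_emod_of_pos hm] at *
      set n : Int := (xs.length : Int) with hn
      have hrnn : 0 ≤ (-n) % m := Int.emod_nonneg _ (by omega)
      have hrlt : (-n) % m < m := Int.emod_lt_of_pos _ hm
      by_cases h0 : n % m = 0
      · have hz : (-n) % m = 0 := by
          have hd : m ∣ n := Int.dvd_of_emod_eq_zero h0
          exact Int.emod_eq_zero_of_dvd ((Int.dvd_neg).mpr hd)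
        rw [padWhile]
        simp only [PySem.Int.mod_eq_emod_of_pos hm]
        rw [if_neg (by simpa using h0), hz]
        rfl
      · have hz : (-n) % m ≠ 0 := by
          intro hc
          apply h0
          have : m ∣ -n := Int.dvd_of_emod_eq_zero hc
          exact Int.emod_eq_zero_of_dvd ((Int.dvd_neg).mp this)
        rw [padWhile]
        simp only [PySem.Int.mod_eq_emod_of_pos hm]
        rw [if_pos (by simpa using h0)]
        have hlen : ((0 :: xs).length : Int) = n + 1 := by simp [hn]
        have hstep : (-(n+1)) % m = (-n) % m - 1 := by
          have h2 : 1 < m := by omega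
          have : (-(n+1)) % m = ((-n) % m - 1 % m) % m := by
            rw [← Int.sub_emod]; ring_nf
          rw [this, Int.emod_eq_of_lt (by omega) h2]
          exact Int.emod_eq_of_lt (by omega) (by omega)
        have hih := ih (0 :: xs)
        rw [hlen] at hih
        rw [hih (by rw [hstep]; omega), hstep]
        have hpos : 0 < ((-n) % m).toNat := by omega
        rw [show ((-n) % m).toNat = (((-n) % m - 1).toNat) + 1 by omega]
        rw [List.replicate_succ']
        simp
lemma main_eq (num : List Int) (m : Int) : deinterleave num m = deinterleave_alt num m := by
  by_cases hm : 0 < m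
  · obtain ⟨mn, hmt⟩ : ∃ mn : Nat, m = (mn : Int) := ⟨m.toNat, (Int.toNat_of_nonneg hm.le).symm⟩
    have hmn2 : m.toNat = mn := by omega
    have hmn3 : 0 < mn := by omega
    set n : Nat := num.length with hn
    set P : Nat := (PySem.Int.mod (-(n : Int)) m).toNat with hP
    have hemod := PySem.Int.mod_eq_emod_of_pos (a := -(n:Int)) hm
    have h1 : -(n:Int) % m < m := Int.emod_lt_of_pos _ hm
    have h2 : 0 ≤ -(n:Int) % m := Int.emod_nonneg _ (by omega)
    have hPn : (P:Int) = -(n:Int) % m := by rw [hP, hemod]; omega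
    have hPlt : P < mn := by omega
    have hpad : padWhile m m.natAbs num = List.replicate P 0 ++ num := by
      exact padWhile_eq m hm m.natAbs num (by rw [hemod]; omega)
    set padded : List Int := List.replicate P 0 ++ num with hpadded
    have hdvd : mn ∣ P + n := by
      have h3 : ((P : Int) + n) % m = 0 := by
        rw [hPn, Int.emod_add_emod]
        simp
      have h5 : (mn : Int) ∣ ((P + n : Nat) : Int) := by
        rw [← hmt]; push_cast; exact Int.dvd_of_emod_eq_zero h3
      exact_mod_cast h5
    obtain ⟨K, hK⟩ := hdvd
    have hlen0 : padded.length = P + n := by simp [hpadded]; omega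
    have hlen : padded.length = K * mn := by rw [hlen0, hK, Nat.mul_comm]
    have hinit : (PySem.List.pyRange 0 m 1).foldl (fun acc _ => acc ++ [([] : List Int)]) []
        = (List.range mn).map (fun _ => ([] : List Int)) := by
      rw [PySem.List.foldl_append_singleton_eq_map (fun _ => ([] : List Int))]
      rw [PySem.List.pyRange_one, List.map_map]
      simp [hmt, Function.comp_def, List.map_const']
    show ((PySem.List.pyRange 0 m 1).map _) = ((PySem.List.pyRange 0 m 1).map _)
    rw [hpad, hinit]
    have hfolds := folds_eq padded m hm K (by rw [hlen, hmn2])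
    rw [hmn2] at hfolds
    rw [hfolds]
    rw [PySem.List.pyRange_one, List.map_map, List.map_map]
    apply List.map_congr_left
    intro jz hjz
    simp only [Function.comp_apply, zero_add, sub_zero] at *
    rw [List.mem_range, hmt, Int.toNat_natCast] at hjz
    have hsl := slice_col padded m hm K (by rw [hlen, hmn2]) jz (by rw [hmn2]; exact hjz)
    rw [hmn2] at hsl
    rw [Int.toNat_natCast, hsl, PySem.List.getD_map_range _ _ _ _ hjz]
  · have hnil : PySem.List.pyRange 0 m 1 = [] := PySem.List.pyRange_one_eq_nil (by omega)
    show ((PySem.List.pyRange 0 m 1).map _) = ((PySem.List.pyRange 0 m 1).map _)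
    rw [hnil]
    rfl

-- ===== VERDICT (by name: the statement is the Claim_ definition above) =====
theorem deinterleave_spec : Claim_equal_deinterleave := by
  intro num m _ _
  unfold Spec_deinterleave
  exact main_eq num m
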